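-- pv_equiv track=rewrite | github.com/Zer0Alchemist/Python-Modules | P03/ex6/ft_analytics_dashboard.py | score_categories
-- ===== SOURCE A (Python) =====
-- def score_categories(dct: dict) -> dict:
--     p_high = 0
--     p_med = 0
--     p_low = 0
--
--     for p, i in dct['players'].items():
--         if i['total_score'] > 5000:
--             p_high += 1
--         if i['total_score'] >= 2000 and i['total_score'] <= 5000:
--             p_med += 1
--         if i['total_score'] < 2000:
--             p_low += 1
--
--     cat = dict(high=p_high, medium=p_med, low=p_low)
--     return cat
-- ===== SOURCE B (Python) =====
-- def score_categories(dct: dict) -> dict: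
--     scores = sorted(v['total_score'] for v in dct['players'].values())
--     n = len(scores)
--     cut1 = _bisect_left(scores, 2000)   # players with score < 2000
--     cut2 = _bisect_left(scores, 5001)   # players with score <= 5000
--     return {'high': n - cut2, 'medium': cut2 - cut1, 'low': cut1}
--
--
-- def _bisect_left(a, x):
--     lo, hi = 0, len(a)
--     while lo < hi:
--         mid = (lo + hi) // 2
--         if a[mid] < x:
--             lo = mid + 1
--         else:
--             hi = mid
--     return lo
-- ===== Notes on version B (the rewrite author's own statement) =====
-- stated objective: alternative
-- what changed: Replaces the fused three-counter loop with sort-then-binary-search: the scores are sorted once and the three bucket sizes are read off two hand-written bisect_left cut points (2000 and 5001).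
import Mathlib
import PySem

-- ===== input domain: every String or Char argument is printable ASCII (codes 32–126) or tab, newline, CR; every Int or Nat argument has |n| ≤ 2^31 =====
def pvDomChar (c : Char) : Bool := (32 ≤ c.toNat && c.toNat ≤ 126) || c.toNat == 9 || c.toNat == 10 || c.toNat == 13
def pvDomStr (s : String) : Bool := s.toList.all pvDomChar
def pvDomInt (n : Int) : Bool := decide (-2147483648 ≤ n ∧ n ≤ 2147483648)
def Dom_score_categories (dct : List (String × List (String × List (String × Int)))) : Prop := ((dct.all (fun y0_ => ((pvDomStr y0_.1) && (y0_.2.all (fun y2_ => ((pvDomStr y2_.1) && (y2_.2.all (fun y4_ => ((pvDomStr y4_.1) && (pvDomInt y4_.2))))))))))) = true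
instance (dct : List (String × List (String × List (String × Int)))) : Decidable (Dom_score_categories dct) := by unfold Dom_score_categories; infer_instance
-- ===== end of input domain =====

-- A fuses the three category counters into one loop; B sorts the scores once and reads the three
-- bucket sizes off two hand-written binary-search cut points (alternative algorithm; Pre_ excludes KeyError inputs).


-- ===== PORT A =====
-- i['total_score']: lookup may raise KeyError, so the loop state is Option (high, med, low);
-- none marks the raising inputs, which Pre_ excludes.
def scoreStepA (st : Option (Int × Int × Int))
    (pi : String × List (String × Int)) : Option (Int × Int × Int) :=
  match st with
  | none => none
  | some (h, m, l) =>
    match (PySem.Dict.ofList pi.2).get? "total_score" with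
    | none => none
    | some s =>
      let h := if s > 5000 then h + 1 else h
      let m := if 2000 ≤ s ∧ s ≤ 5000 then m + 1 else m
      let l := if s < 2000 then l + 1 else l
      some (h, m, l)

def score_categories (dct : List (String × List (String × List (String × Int)))) : List (String × Int) :=
  match (PySem.Dict.ofList dct).get? "players" with
  | none => []  -- KeyError in Python; excluded by Pre_
  | some players =>
    match ((PySem.Dict.ofList players).items).foldl scoreStepA (some (0, 0, 0)) with
    | none => []  -- KeyError in Python; excluded by Pre_
    | some (h, m, l) => [("high", h), ("medium", m), ("low", l)]

-- ===== PORT B =====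
-- _bisect_left's while loop as recursion on hi - lo; mid always satisfies lo ≤ mid < hi ≤ len,
-- so a[mid] is in range and getD's default is never used — exact on every reachable state.
def bisectGo (a : List Int) (x : Int) (lo hi : Nat) : Nat :=
  if h : lo < hi then
    let mid := (lo + hi) / 2
    if a.getD mid 0 < x then bisectGo a x (mid + 1) hi else bisectGo a x lo mid
  else lo
termination_by hi - lo
decreasing_by all_goals omega

def score_categories_alt (dct : List (String × List (String × List (String × Int)))) : List (String × Int) :=
  match (PySem.Dict.ofList dct).get? "players" with
  | none => []  -- KeyError in Python; excluded by Pre_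
  | some players =>
    match ((PySem.Dict.ofList players).values).mapM
        (fun v => (PySem.Dict.ofList v).get? "total_score") with
    | none => []  -- KeyError in Python (raised inside sorted()'s generator); excluded by Pre_
    | some raw =>
      let scores := PySem.List.sorted raw (fun s => s) false
      let n : Int := scores.length
      let cut1 : Int := bisectGo scores 2000 0 scores.length
      let cut2 : Int := bisectGo scores 5001 0 scores.length
      [("high", n - cut2), ("medium", cut2 - cut1), ("low", cut1)]

-- ===== PRECONDITION & SPEC =====
-- Pre_ excludes exactly the inputs where Python raises KeyError: no "players" key,
-- or some player's record has no "total_score" key.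
def Pre_score_categories (dct : List (String × List (String × List (String × Int)))) : Prop :=
  (match (PySem.Dict.ofList dct).get? "players" with
   | none => false
   | some players =>
     ((PySem.Dict.ofList players).values).all
       (fun v => ((PySem.Dict.ofList v).get? "total_score").isSome)) = true
instance (dct : List (String × List (String × List (String × Int)))) : Decidable (Pre_score_categories dct) := by unfold Pre_score_categories; infer_instance

def pvWitness_score_categories : (List (String × List (String × List (String × Int)))) :=
  [("players", [("alice", [("total_score", 2500)]), ("bob", [("total_score", 7000)])])]

def Spec_score_categories (dct : List (String × List (String × List (String × Int)))) (out : List (String × Int)) : Prop := out = score_categories_alt dct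
instance (dct : List (String × List (String × List (String × Int)))) (out : List (String × Int)) : Decidable (Spec_score_categories dct out) := by unfold Spec_score_categories; infer_instance

-- ===== CLAIM (what is proved, stated in full; the proofs are below) =====
def Claim_equal_score_categories : Prop := ∀ (dct : List (String × List (String × List (String × Int)))), Dom_score_categories dct → Pre_score_categories dct → Spec_score_categories dct (score_categories dct)

-- ===== LEMMAS AND PROOFS =====

-- A's loop over items, with every lookup succeeding, adds the three bucket counts.
theorem scoreLoopA (ps : List (String × List (String × Int))) :
    ∀ (h m l : Int),
    (∀ p ∈ ps, ((PySem.Dict.ofList p.2).get? "total_score").isSome) →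
    ps.foldl scoreStepA (some (h, m, l)) =
      some (h + (ps.countP (fun p => ((PySem.Dict.ofList p.2).get? "total_score").getD 0 > 5000) : Int),
            m + (ps.countP (fun p => 2000 ≤ ((PySem.Dict.ofList p.2).get? "total_score").getD 0 ∧ ((PySem.Dict.ofList p.2).get? "total_score").getD 0 ≤ 5000) : Int),
            l + (ps.countP (fun p => ((PySem.Dict.ofList p.2).get? "total_score").getD 0 < 2000) : Int)) := by
  induction ps with
  | nil => intro h m l _; simp
  | cons p ps ih =>
    intro h m l hall
    obtain ⟨s, hs⟩ := Option.isSome_iff_exists.mp (hall p (by simp))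
    have hrest : ∀ q ∈ ps, ((PySem.Dict.ofList q.2).get? "total_score").isSome :=
      fun q hq => hall q (by simp [hq])
    simp only [List.foldl_cons, scoreStepA, hs]
    rw [ih]
    · simp only [List.countP_cons, hs, Option.getD_some]
      refine congrArg some ?_
      refine Prod.ext ?_ (Prod.ext ?_ ?_) <;> simp <;> split_ifs <;> omega
    · exact hrest

-- mapM over Option where every element succeeds.
theorem mapM_all_some {α : Type} (f : α → Option Int) (vs : List α)
    (hall : ∀ v ∈ vs, (f v).isSome) :
    vs.mapM f = some (vs.map (fun v => (f v).getD 0)) := by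
  induction vs with
  | nil => rfl
  | cons v vs ih =>
    obtain ⟨s, hs⟩ := Option.isSome_iff_exists.mp (hall v (by simp))
    rw [List.mapM_cons, hs, ih (fun q hq => hall q (by simp [hq]))]
    simp [hs]

-- A partition point of a list determines the count of elements below x.
theorem countP_partition (a : List Int) (x : Int) :
    ∀ r : Nat, r ≤ a.length →
    (∀ i (h : i < a.length), i < r → a[i] < x) →
    (∀ i (h : i < a.length), r ≤ i → x ≤ a[i]) →
    a.countP (fun s => s < x) = r := by
  induction a with
  | nil => intro r hr _ _; simpa using (Nat.le_zero.mp hr).symm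
  | cons y t ih =>
    intro r hr hlt hge
    cases r with
    | zero =>
      have hy : x ≤ y := hge 0 (by simp) (Nat.zero_le _)
      have ht : t.countP (fun s => s < x) = 0 := by
        refine ih 0 (Nat.zero_le _) (by intro i h hi; omega) ?_
        intro i h _
        exact hge (i + 1) (by simpa using Nat.succ_lt_succ h) (Nat.zero_le _)
      simp [ht, not_lt.mpr hy]
    | succ r =>
      have hy : y < x := hlt 0 (by simp) (Nat.succ_pos _)
      have ht : t.countP (fun s => s < x) = r := by
        refine ih r (by simpa using hr) ?_ ?_
        · intro i h hi
          exact hlt (i + 1) (by simpa using Nat.succ_lt_succ h) (Nat.succ_lt_succ hi)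
        · intro i h hi
          exact hge (i + 1) (by simpa using Nat.succ_lt_succ h) (Nat.succ_le_succ hi)
      simp [ht, hy]

-- The binary search, on a sorted list with the loop invariant, lands on the partition point.
theorem bisectGo_countP (a : List Int) (x : Int) (hs : a.Pairwise (· ≤ ·)) :
    ∀ n lo hi, hi - lo ≤ n → lo ≤ hi → hi ≤ a.length →
    (∀ i (h : i < a.length), i < lo → a[i] < x) →
    (∀ i (h : i < a.length), hi ≤ i → x ≤ a[i]) →
    bisectGo a x lo hi = a.countP (fun s => s < x) := by
  have hmono : ∀ i j (hi : i < a.length) (hj : j < a.length), i ≤ j → a[i] ≤ a[j] := by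
    intro i j hi hj hij
    rcases Nat.lt_or_ge i j with h | h
    · exact List.pairwise_iff_getElem.mp hs i j hi hj h
    · have : i = j := by omega
      subst this; exact le_refl _
  intro n
  induction n with
  | zero =>
    intro lo hi hn hlohi hhi hlt hge
    have : lo = hi := by omega
    subst this
    rw [bisectGo]
    simp only [lt_irrefl, dite_false]
    exact (countP_partition a x lo hhi hlt hge).symm
  | succ n ih =>
    intro lo hi hn hlohi hhi hlt hge
    rw [bisectGo]
    by_cases hcond : lo < hi
    · simp only [hcond, dite_true]
      have hmidlt : (lo + hi) / 2 < a.length := by omega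
      have hmidlo : lo ≤ (lo + hi) / 2 := by omega
      have hmidhi : (lo + hi) / 2 < hi := by omega
      rw [List.getD_eq_getElem _ _ hmidlt]
      by_cases hm : a[(lo + hi) / 2] < x
      · simp only [hm, if_true]
        refine ih ((lo + hi) / 2 + 1) hi (by omega) (by omega) hhi ?_ hge
        intro i h hi2
        calc a[i] ≤ a[(lo + hi) / 2] := hmono i _ h hmidlt (by omega)
          _ < x := hm
      · simp only [hm, if_false]
        refine ih lo ((lo + hi) / 2) (by omega) (by omega) (by omega) hlt ?_
        intro i h hi2
        calc x ≤ a[(lo + hi) / 2] := not_lt.mp hm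
          _ ≤ a[i] := hmono _ i hmidlt h hi2
    · simp only [hcond, dite_false]
      have : lo = hi := by omega
      subst this
      exact (countP_partition a x lo hhi hlt hge).symm

-- Wrapper: on a sorted list, the search over the whole range counts the elements below x.
theorem bisectGo_full (raw : List Int) (x : Int) :
    bisectGo (PySem.List.sorted raw (fun s => s) false) x 0 raw.length
      = raw.countP (fun s => s < x) := by
  rw [← PySem.List.length_sorted raw (fun s => s) false]
  have hs : (PySem.List.sorted raw (fun s => s) false).Pairwise (· ≤ ·) :=
    PySem.List.sorted_pairwise raw (fun s => s)
  rw [bisectGo_countP _ x hs _ 0 _ (le_refl _) (Nat.zero_le _) (le_refl _)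
      (by intro i h hi; omega) (by intro i h hi; omega)]
  exact ((PySem.List.sorted_perm raw (fun s => s) false).countP_eq _)

-- The bucket counts are determined by the two cut counts and the length.
theorem countP_buckets (l : List Int) :
    l.countP (fun s => s < 5001)
      = l.countP (fun s => s < 2000) + l.countP (fun s => 2000 ≤ s ∧ s ≤ 5000) ∧
    l.length = l.countP (fun s => s < 5001) + l.countP (fun s => s > 5000) := by
  induction l with
  | nil => simp
  | cons y t ih =>
    simp only [List.countP_cons, List.length_cons]
    constructor <;> (split_ifs <;> simp_all <;> omega)

-- ===== VERDICT (by name: the statement is the Claim_ definition above) =====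
theorem score_categories_spec : Claim_equal_score_categories := by
  intro dct _ hpre
  unfold Spec_score_categories score_categories score_categories_alt
  unfold Pre_score_categories at hpre
  cases hp : (PySem.Dict.ofList dct).get? "players" with
  | none => rw [hp] at hpre
  | some players =>
    rw [hp] at hpre
    simp only [List.all_eq_true] at hpre
    have hall : ∀ p ∈ (PySem.Dict.ofList players).items,
        ((PySem.Dict.ofList p.2).get? "total_score").isSome := by
      intro p hpmem
      exact hpre p.2 (by simpa [PySem.Dict.values] using List.mem_map_of_mem (f := Prod.snd) hpmem)
    have hall2 : ∀ v ∈ (PySem.Dict.ofList players).values,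
        ((PySem.Dict.ofList v).get? "total_score").isSome := by
      intro v hv
      simp only [PySem.Dict.values, List.mem_map] at hv
      obtain ⟨p, hpmem, rfl⟩ := hv
      exact hall p hpmem
    simp only [scoreLoopA _ 0 0 0 hall, mapM_all_some _ _ hall2, zero_add]
    set raw := ((PySem.Dict.ofList players).values).map
        (fun v => ((PySem.Dict.ofList v).get? "total_score").getD 0) with hraw
    simp only [PySem.List.length_sorted]
    rw [bisectGo_full, bisectGo_full]
    obtain ⟨h1, h2⟩ := countP_buckets raw
    have hcmap : ∀ (q : Int → Prop) [DecidablePred q],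
        raw.countP (fun s => q s)
          = ((PySem.Dict.ofList players).items).countP
              (fun p => q (((PySem.Dict.ofList p.2).get? "total_score").getD 0)) := by
      intro q _
      rw [hraw, List.countP_map, PySem.Dict.values, List.countP_map]
      rfl
    rw [hcmap (fun s => s < 5001), hcmap (fun s => s < 2000),
        hcmap (fun s => 2000 ≤ s ∧ s ≤ 5000)] at h1
    have hlen : raw.length = ((PySem.Dict.ofList players).items).length := by
      rw [hraw, List.length_map, PySem.Dict.values, List.length_map]
    rw [hcmap (fun s => s < 5001), hcmap (fun s => s > 5000), hlen] at h2
    rw [hcmap (fun s => s < 5001), hcmap (fun s => s < 2000), hlen]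
    simp only [List.cons.injEq, Prod.mk.injEq, true_and, and_true]
    omega
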